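-- pv_equiv track=rewrite | github.com/deploypilotorg/client_mcp_server | mcp-client/streamlit/server.py | _generate_app_description
-- ===== SOURCE A (Python) =====
-- def _generate_app_description(file_path, content):
--     """Generate a description for the application"""
--     # Extract first non-empty comment lines as potential description
--     lines = content.split('\n')
--     comment_blocks = []
--     current_block = []
--
--     for line in lines:
--         stripped = line.strip()
--         if stripped.startswith('#') or stripped.startswith('//') or stripped.startswith('/*') or stripped.startswith('*'):
--             # Handle comments
--             comment_text = stripped.lstrip('#').lstrip('/').lstrip('*').strip()
--             if comment_text:
--                 current_block.append(comment_text)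
--         elif stripped.startswith('"""') or stripped.startswith("'''"):
--             # Handle docstrings
--             docstring_text = stripped.lstrip('"').lstrip("'").strip()
--             if docstring_text:
--                 current_block.append(docstring_text)
--         elif current_block:
--             comment_blocks.append(' '.join(current_block))
--             current_block = []
--
--     if current_block:
--         comment_blocks.append(' '.join(current_block))
--
--     if comment_blocks:
--         # Use the first substantial comment block as description
--         for block in comment_blocks:
--             if len(block) > 10:  # Arbitrary threshold for a meaningful comment
--                 return block[:200] + "..." if len(block) > 200 else block
--
--     # If no good comments, generate a basic description based on file type
--     if file_path.endswith('.py'):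
--         return "Python application"
--     elif file_path.endswith('.js'):
--         return "JavaScript application"
--     elif file_path.endswith('.html'):
--         return "HTML application"
--     elif file_path == 'package.json':
--         return "Node.js application"
--     elif file_path == 'requirements.txt':
--         return "Python application with dependencies"
--
--     return "Application with unknown type"
-- ===== SOURCE B (Python) =====
-- def _comment_text(line):
--     """Classify one line: its extracted comment text, or None if not comment-like."""
--     stripped = line.strip()
--     if stripped.startswith('#') or stripped.startswith('//') or stripped.startswith('/*') or stripped.startswith('*'):
--         return stripped.lstrip('#').lstrip('/').lstrip('*').strip()
--     if stripped.startswith('"""') or stripped.startswith("'''"):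
--         return stripped.lstrip('"').lstrip("'").strip()
--     return None
--
--
-- def _first_block(lines):
--     """Return the first maximal comment-like run whose joined text exceeds 10 chars."""
--     while lines:
--         if _comment_text(lines[0]) is None:
--             lines = lines[1:]
--         else:
--             j = 0
--             while j < len(lines) and _comment_text(lines[j]) is not None:
--                 j += 1
--             block = ' '.join(t for t in map(_comment_text, lines[:j]) if t)
--             if len(block) > 10:
--                 return block
--             lines = lines[j:]
--     return None
--
--
-- def _generate_app_description(file_path, content):
--     block = _first_block(content.split('\n'))
--     if block is not None:
--         return block[:200] + "..." if len(block) > 200 else block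
--
--     if file_path.endswith('.py'):
--         return "Python application"
--     elif file_path.endswith('.js'):
--         return "JavaScript application"
--     elif file_path.endswith('.html'):
--         return "HTML application"
--     elif file_path == 'package.json':
--         return "Node.js application"
--     elif file_path == 'requirements.txt':
--         return "Python application with dependencies"
--
--     return "Application with unknown type"
-- ===== Notes on version B (the rewrite author's own statement) =====
-- stated objective: simpler
-- what changed: A accumulates every comment block with (blocks, current_block) fold state and then rescans the collected list for the first block longer than 10 chars; B classifies lines with one helper and walks the lines once, jumping over each maximal comment-like run with takewhile-style scanning and returning the first substantial joined run directly, never materialising the block list.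
import Mathlib
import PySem

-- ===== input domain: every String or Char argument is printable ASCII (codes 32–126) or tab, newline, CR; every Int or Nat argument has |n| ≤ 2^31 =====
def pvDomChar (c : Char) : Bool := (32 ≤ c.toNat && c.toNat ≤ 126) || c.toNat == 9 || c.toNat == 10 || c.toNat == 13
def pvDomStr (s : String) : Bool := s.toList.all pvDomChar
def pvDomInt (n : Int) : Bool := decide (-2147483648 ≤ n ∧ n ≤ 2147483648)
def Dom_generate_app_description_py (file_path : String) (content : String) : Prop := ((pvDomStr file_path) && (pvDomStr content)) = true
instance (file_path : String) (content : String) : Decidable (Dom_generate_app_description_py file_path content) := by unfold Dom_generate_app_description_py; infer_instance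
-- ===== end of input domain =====

-- B replaces A's collect-all-blocks fold (blocks/current_block state plus a second scan over
-- the collected blocks) by a single early-returning recursion over maximal comment-like runs
-- (takeWhile/dropWhile); objective: simpler decomposition, same cost.

-- shared primitive: hand port of Python's str.lstrip(chars) — drops every leading
-- character belonging to the set `chars`; exact on all strings.
def pyLstripChars (s : String) (chars : String) : String :=
  String.ofList (s.toList.dropWhile (fun c => c ∈ chars.toList))

-- ===== PORT A =====
-- loop body of A's for-line loop, state = (comment_blocks, current_block)
def stepA (st : List String × List String) (line : String) : List String × List String :=
  let stripped := PySem.Str.strip line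
  if PySem.Str.startswith stripped "#" || PySem.Str.startswith stripped "//" ||
     PySem.Str.startswith stripped "/*" || PySem.Str.startswith stripped "*" then
    let comment_text := PySem.Str.strip (pyLstripChars (pyLstripChars (pyLstripChars stripped "#") "/") "*")
    if comment_text ≠ "" then (st.1, st.2 ++ [comment_text]) else st
  else if PySem.Str.startswith stripped "\"\"\"" || PySem.Str.startswith stripped "'''" then
    let docstring_text := PySem.Str.strip (pyLstripChars (pyLstripChars stripped "\"") "'")
    if docstring_text ≠ "" then (st.1, st.2 ++ [docstring_text]) else st
  else if st.2 ≠ [] then (st.1 ++ [PySem.Str.join " " st.2], [])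
  else st

-- A's 'for block in comment_blocks: if len(block) > 10: return …' early-return scan
def firstSubstantialA : List String → Option String
  | [] => none
  | b :: bs => if PySem.Str.len b > 10 then some b else firstSubstantialA bs

def generate_app_description_py (file_path : String) (content : String) : String :=
  match firstSubstantialA
      (if ((((PySem.Str.split? content "\n").getD []).foldl stepA ([], [])).2 ≠ []) then
        (((PySem.Str.split? content "\n").getD []).foldl stepA ([], [])).1
          ++ [PySem.Str.join " " ((((PySem.Str.split? content "\n").getD []).foldl stepA ([], [])).2)]
      else (((PySem.Str.split? content "\n").getD []).foldl stepA ([], [])).1) with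
  | some block =>
      if PySem.Str.len block > 200 then PySem.Str.slice block none (some 200) ++ "..." else block
  | none =>
      if PySem.Str.endswith file_path ".py" then "Python application"
      else if PySem.Str.endswith file_path ".js" then "JavaScript application"
      else if PySem.Str.endswith file_path ".html" then "HTML application"
      else if file_path = "package.json" then "Node.js application"
      else if file_path = "requirements.txt" then "Python application with dependencies"
      else "Application with unknown type"

-- ===== PORT B =====
-- _comment_text: some extracted text if the line is comment-like, none otherwise
def commentTextAlt (line : String) : Option String :=
  let stripped := PySem.Str.strip line
  if PySem.Str.startswith stripped "#" || PySem.Str.startswith stripped "//" ||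
     PySem.Str.startswith stripped "/*" || PySem.Str.startswith stripped "*" then
    some (PySem.Str.strip (pyLstripChars (pyLstripChars (pyLstripChars stripped "#") "/") "*"))
  else if PySem.Str.startswith stripped "\"\"\"" || PySem.Str.startswith stripped "'''" then
    some (PySem.Str.strip (pyLstripChars (pyLstripChars stripped "\"") "'"))
  else none

-- _block_text: join the nonempty extracted texts of a run with spaces
def blockTextAlt (run : List String) : String :=
  PySem.Str.join " " ((run.filterMap commentTextAlt).filter (fun x => decide (x ≠ "")))

-- _first_block: walk the lines, jumping over each maximal comment-like run at once
def firstBlockAlt (ls : List String) : Option String :=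
  match ls with
  | [] => none
  | line :: rest =>
    if h : (commentTextAlt line).isSome then
      if PySem.Str.len (blockTextAlt ((line :: rest).takeWhile (fun l => (commentTextAlt l).isSome))) > 10 then
        some (blockTextAlt ((line :: rest).takeWhile (fun l => (commentTextAlt l).isSome)))
      else firstBlockAlt ((line :: rest).dropWhile (fun l => (commentTextAlt l).isSome))
    else firstBlockAlt rest
termination_by ls.length
decreasing_by
  · simp only [List.dropWhile_cons, h, if_pos]
    have := List.length_dropWhile_le (fun l => (commentTextAlt l).isSome) rest
    simp only [List.length_cons]; omega
  · simp

def generate_app_description_py_alt (file_path : String) (content : String) : String :=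
  match firstBlockAlt ((PySem.Str.split? content "\n").getD []) with
  | some block =>
      if PySem.Str.len block > 200 then PySem.Str.slice block none (some 200) ++ "..." else block
  | none =>
      if PySem.Str.endswith file_path ".py" then "Python application"
      else if PySem.Str.endswith file_path ".js" then "JavaScript application"
      else if PySem.Str.endswith file_path ".html" then "HTML application"
      else if file_path = "package.json" then "Node.js application"
      else if file_path = "requirements.txt" then "Python application with dependencies"
      else "Application with unknown type"

-- ===== PRECONDITION & SPEC =====
def Spec_generate_app_description_py (file_path : String) (content : String) (out : String) : Prop := out = generate_app_description_py_alt file_path content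
instance (file_path : String) (content : String) (out : String) : Decidable (Spec_generate_app_description_py file_path content out) := by unfold Spec_generate_app_description_py; infer_instance

-- ===== CLAIM (what is proved, stated in full; the proofs are below) =====
def Claim_equal_generate_app_description_py : Prop := ∀ (file_path : String) (content : String), Dom_generate_app_description_py file_path content → Spec_generate_app_description_py file_path content (generate_app_description_py file_path content)

-- ===== LEMMAS AND PROOFS =====

-- A's loop body expressed through B's per-line classifier
theorem stepA_eq (st : List String × List String) (l : String) :
    stepA st l = match commentTextAlt l with
      | some t => if t ≠ "" then (st.1, st.2 ++ [t]) else st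
      | none => if st.2 ≠ [] then (st.1 ++ [PySem.Str.join " " st.2], []) else st := by
  rw [stepA, commentTextAlt]
  split_ifs <;> rfl

-- the list of blocks A's fold produces, as a recursion with the open block as state
def blocksFrom (curr : List String) : List String → List String
  | [] => if curr ≠ [] then [PySem.Str.join " " curr] else []
  | l :: ls =>
    match commentTextAlt l with
    | some t => blocksFrom (if t ≠ "" then curr ++ [t] else curr) ls
    | none =>
      if curr ≠ [] then PySem.Str.join " " curr :: blocksFrom [] ls
      else blocksFrom [] ls

theorem fold_blocks (ls : List String) (bs curr : List String) :
    (if (ls.foldl stepA (bs, curr)).2 ≠ [] then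
        (ls.foldl stepA (bs, curr)).1 ++ [PySem.Str.join " " (ls.foldl stepA (bs, curr)).2]
     else (ls.foldl stepA (bs, curr)).1)
    = bs ++ blocksFrom curr ls := by
  induction ls generalizing bs curr with
  | nil =>
    simp only [List.foldl_nil, blocksFrom]
    by_cases hc : curr = [] <;> simp [hc]
  | cons l ls ih =>
    rw [List.foldl_cons, stepA_eq, blocksFrom]
    cases hc : commentTextAlt l with
    | some t =>
      simp only
      by_cases ht : t ≠ ""
      · rw [if_pos ht, if_pos ht]; exact ih ..
      · rw [if_neg ht, if_neg ht]; exact ih ..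
    | none =>
      simp only
      by_cases hcur : curr ≠ []
      · rw [if_pos hcur, if_pos hcur, ih]; simp
      · rw [if_neg hcur, if_neg hcur]
        simp only [not_not] at hcur; subst hcur
        exact ih ..

-- consuming a run of comment-like lines just extends the open block
theorem blocksFrom_run (run : List String) (rest : List String) (curr : List String)
    (h : ∀ l ∈ run, (commentTextAlt l).isSome) :
    blocksFrom curr (run ++ rest)
      = blocksFrom (curr ++ (run.filterMap commentTextAlt).filter (fun x => decide (x ≠ ""))) rest := by
  induction run generalizing curr with
  | nil => simp
  | cons l run ih =>
    have hl : (commentTextAlt l).isSome := h l (List.mem_cons_self ..)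
    obtain ⟨t, ht⟩ := Option.isSome_iff_exists.mp hl
    rw [List.cons_append, blocksFrom, List.filterMap_cons, ht]
    simp only [List.filter_cons]
    by_cases htt : t ≠ ""
    · rw [if_pos htt, if_pos (by simpa using htt)]
      rw [ih _ (fun l hl => h l (List.mem_cons_of_mem _ hl))]
      simp
    · rw [if_neg htt, if_neg (by simpa using htt)]
      exact ih _ (fun l hl => h l (List.mem_cons_of_mem _ hl))

-- flushing a nonempty open block at a run boundary
theorem blocksFrom_close (rest : List String) (curr : List String) (hcur : curr ≠ [])
    (h : rest = [] ∨ ∃ r rs, rest = r :: rs ∧ commentTextAlt r = none) :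
    blocksFrom curr rest = PySem.Str.join " " curr :: blocksFrom [] rest := by
  rcases h with h | ⟨r, rs, hr, hn⟩
  · subst h; simp [blocksFrom, hcur]
  · subst hr; simp [blocksFrom, hn, hcur]

-- the head of a dropWhile is not comment-like
theorem dropWhile_head_none (ls : List String) :
    ls.dropWhile (fun l => (commentTextAlt l).isSome) = []
    ∨ ∃ r rs, ls.dropWhile (fun l => (commentTextAlt l).isSome) = r :: rs ∧ commentTextAlt r = none := by
  cases hd : ls.dropWhile (fun l => (commentTextAlt l).isSome) with
  | nil => exact Or.inl rfl
  | cons r rs =>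
    refine Or.inr ⟨r, rs, rfl, ?_⟩
    have hh := List.head_dropWhile_not (fun l => (commentTextAlt l).isSome) (l := ls) (by simp [hd])
    simp only [hd, List.head_cons] at hh
    exact Option.not_isSome_iff_eq_none.mp (by simp [hh])

-- main lemma: A's two-phase scan equals B's run-jumping recursion
set_option maxHeartbeats 2000000 in
theorem firstSub_eq_firstBlock (ls : List String) :
    firstSubstantialA (blocksFrom [] ls) = firstBlockAlt ls := by
  induction ls using firstBlockAlt.induct with
  | case1 => simp [firstBlockAlt, blocksFrom, firstSubstantialA]
  | case2 line rest h hlen =>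
    rw [firstBlockAlt, dif_pos h, if_pos hlen]
    conv_lhs => rw [(List.takeWhile_append_dropWhile (p := fun l => (commentTextAlt l).isSome) (l := line :: rest)).symm]
    rw [blocksFrom_run _ _ [] (fun l hl => List.mem_takeWhile_imp (p := fun l => (commentTextAlt l).isSome) hl), List.nil_append]
    have hcne : (((line :: rest).takeWhile (fun l => (commentTextAlt l).isSome)).filterMap commentTextAlt).filter (fun x => decide (x ≠ "")) ≠ [] := by
      intro hnil
      rw [blockTextAlt, hnil] at hlen
      revert hlen; decide
    rw [blockTextAlt] at hlen
    rw [blocksFrom_close _ _ hcne (dropWhile_head_none _), firstSubstantialA, if_pos hlen,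
        blockTextAlt]
  | case3 line rest h hlen ih =>
    rw [firstBlockAlt, dif_pos h, if_neg hlen]
    conv_lhs => rw [(List.takeWhile_append_dropWhile (p := fun l => (commentTextAlt l).isSome) (l := line :: rest)).symm]
    rw [blocksFrom_run _ _ [] (fun l hl => List.mem_takeWhile_imp (p := fun l => (commentTextAlt l).isSome) hl), List.nil_append]
    rw [blockTextAlt] at hlen
    by_cases hcne : (((line :: rest).takeWhile (fun l => (commentTextAlt l).isSome)).filterMap commentTextAlt).filter (fun x => decide (x ≠ "")) ≠ []
    · rw [blocksFrom_close _ _ hcne (dropWhile_head_none _), firstSubstantialA, if_neg hlen]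
      exact ih
    · simp only [not_not] at hcne
      rw [hcne]
      exact ih
  | case4 line rest h ih =>
    have hn : commentTextAlt line = none := Option.not_isSome_iff_eq_none.mp (by simpa using h)
    rw [firstBlockAlt, dif_neg h]
    have hb : blocksFrom [] (line :: rest) = blocksFrom [] rest := by simp [blocksFrom, hn]
    rw [hb]
    exact ih

-- ===== VERDICT (by name: the statement is the Claim_ definition above) =====
theorem generate_app_description_py_spec : Claim_equal_generate_app_description_py := by
  intro file_path content _
  unfold Spec_generate_app_description_py generate_app_description_py generate_app_description_py_alt
  rw [fold_blocks ((PySem.Str.split? content "\n").getD []) [] [], List.nil_append,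
      firstSub_eq_firstBlock]
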